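-- pv_equiv track=rewrite | github.com/will-hedges/advent-of-code | day_03_2021.py | get_gamma_rate
-- ===== SOURCE A (Python) =====
-- def get_gamma_rate(data):
--     gamma_rate = ''
--     for i in range(len(data[0])):
--         bits = [s[i] for s in data]
--         if bits.count('1') > bits.count('0'):
--             gamma_rate += '1'
--         else:
--             gamma_rate += '0'
--     return gamma_rate
-- ===== SOURCE B (Python) =====
-- def get_gamma_rate(data):
--     m = len(data[0])
--     ones = [0] * m
--     zeros = [0] * m
--     for s in data:
--         for i in range(m):
--             c = s[i]
--             if c == '1':
--                 ones[i] += 1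
--             elif c == '0':
--                 zeros[i] += 1
--     return ''.join('1' if ones[i] > zeros[i] else '0' for i in range(m))
-- ===== Notes on version B (the rewrite author's own statement) =====
-- stated objective: alternative
-- what changed: Row-major single pass keeping per-column one/zero tallies in two arrays, instead of A's column-major loop that rebuilds and counts a per-column list of bits.
import Mathlib
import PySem

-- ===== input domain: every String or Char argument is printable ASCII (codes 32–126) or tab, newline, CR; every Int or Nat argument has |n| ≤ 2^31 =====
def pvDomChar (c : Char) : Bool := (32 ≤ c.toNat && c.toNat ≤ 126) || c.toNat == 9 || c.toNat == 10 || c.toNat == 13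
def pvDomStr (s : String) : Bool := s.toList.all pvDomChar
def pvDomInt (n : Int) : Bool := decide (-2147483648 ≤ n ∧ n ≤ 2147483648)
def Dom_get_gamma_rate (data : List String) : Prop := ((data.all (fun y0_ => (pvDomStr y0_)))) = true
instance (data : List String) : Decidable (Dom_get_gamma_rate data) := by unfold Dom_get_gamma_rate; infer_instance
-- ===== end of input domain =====

-- B changes the decomposition: one row-major pass keeping per-column one/zero tallies,
-- instead of A's column-major loop rebuilding and counting a bit list per column (objective: alternative).

-- ===== PORT A =====
def get_gamma_rate (data : List String) : String :=
  let s0 := PySem.List.pyGetD data 0 ""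
  String.ofList ((PySem.List.pyRange 0 (PySem.Str.len s0) 1).foldl (fun g i =>
    let bits := data.map (fun s => (PySem.Str.pyGet? s i).getD ' ')
    if PySem.List.count bits '1' > PySem.List.count bits '0' then g ++ ['1'] else g ++ ['0']) [])

-- ===== PORT B =====
-- one step of B's inner loop: look at column i of row s and bump the matching tally
def rowStep (s : String) (oz : List Int × List Int) (i : Int) : List Int × List Int :=
  let c := (PySem.Str.pyGet? s i).getD ' '
  if c = '1' then (PySem.List.pySetD oz.1 i (PySem.List.pyGetD oz.1 i 0 + 1), oz.2)
  else if c = '0' then (oz.1, PySem.List.pySetD oz.2 i (PySem.List.pyGetD oz.2 i 0 + 1))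
  else oz

def get_gamma_rate_alt (data : List String) : String :=
  let m := PySem.Str.len (PySem.List.pyGetD data 0 "")
  let tall := data.foldl (fun oz s => (PySem.List.pyRange 0 m 1).foldl (rowStep s) oz)
      (List.replicate m.toNat 0, List.replicate m.toNat 0)
  String.ofList ((PySem.List.pyRange 0 m 1).foldl (fun g i =>
    if PySem.List.pyGetD tall.1 i 0 > PySem.List.pyGetD tall.2 i 0 then g ++ ['1'] else g ++ ['0']) [])

-- ===== PRECONDITION & SPEC =====
-- Pre_ excludes exactly the inputs on which Python A raises IndexError: empty data
-- (data[0]) and data containing a row shorter than the first row (s[i]).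
def Pre_get_gamma_rate (data : List String) : Prop :=
  data ≠ [] ∧ ∀ s ∈ data, PySem.Str.len (PySem.List.pyGetD data 0 "") ≤ PySem.Str.len s
instance (data : List String) : Decidable (Pre_get_gamma_rate data) := by
  unfold Pre_get_gamma_rate; infer_instance
def pvWitness_get_gamma_rate : List String := ["10", "11", "01"]
def Spec_get_gamma_rate (data : List String) (out : String) : Prop := out = get_gamma_rate_alt data
instance (data : List String) (out : String) : Decidable (Spec_get_gamma_rate data out) := by
  unfold Spec_get_gamma_rate; infer_instance

-- ===== CLAIM (what is proved, stated in full; the proofs are below) =====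
def Claim_equal_get_gamma_rate : Prop := ∀ (data : List String), Dom_get_gamma_rate data → Pre_get_gamma_rate data → Spec_get_gamma_rate data (get_gamma_rate data)

-- ===== LEMMAS AND PROOFS =====

-- character of column k of row s (space if the row is too short), as both ports read it
def col (s : String) (k : Nat) : Char := (s.toList[k]?).getD ' '

lemma rowStep_eq (s : String) (oz : List Int × List Int) (k : Nat) :
    rowStep s oz (k : Int) =
      (if col s k = '1' then (oz.1.set k (oz.1.getD k 0 + 1), oz.2)
       else if col s k = '0' then (oz.1, oz.2.set k (oz.2.getD k 0 + 1))
       else oz) := by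
  simp [rowStep, col]

lemma inner_tally (s : String) (n : Nat) (oz : List Int × List Int)
    (h1 : n ≤ oz.1.length) (h2 : n ≤ oz.2.length) :
    ((PySem.List.pyRange 0 (n : Int) 1).foldl (rowStep s) oz).1.length = oz.1.length ∧
    ((PySem.List.pyRange 0 (n : Int) 1).foldl (rowStep s) oz).2.length = oz.2.length ∧
    ∀ k : Nat,
      ((PySem.List.pyRange 0 (n : Int) 1).foldl (rowStep s) oz).1.getD k 0
        = oz.1.getD k 0 + (if k < n ∧ col s k = '1' then 1 else 0) ∧
      ((PySem.List.pyRange 0 (n : Int) 1).foldl (rowStep s) oz).2.getD k 0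
        = oz.2.getD k 0 + (if k < n ∧ col s k = '0' then 1 else 0) := by
  induction n with
  | zero =>
    simp [PySem.List.pyRange_one_eq_nil]
  | succ n ih =>
    obtain ⟨L1, L2, H⟩ := ih (le_trans (Nat.le_succ n) h1) (le_trans (Nat.le_succ n) h2)
    have hcast : ((n + 1 : Nat) : Int) = (n : Int) + 1 := by push_cast; ring
    rw [hcast, PySem.List.pyRange_one_succ_right (by positivity), List.foldl_append]
    set r := (PySem.List.pyRange 0 (n : Int) 1).foldl (rowStep s) oz with hr
    simp only [List.foldl_cons, List.foldl_nil]
    rw [rowStep_eq s r n]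
    split_ifs with hc1 hc0
    · refine ⟨by simpa using L1, L2, fun k => ⟨?_, ?_⟩⟩
      · obtain ⟨K1, _⟩ := H k
        by_cases hk : k = n
        · subst hk
          rw [List.getD_eq_getElem?_getD, List.getElem?_set_self (by omega)]
          simp only [Option.getD_some]
          rw [K1] at *
          simp [hc1]
        · rw [List.getD_eq_getElem?_getD, List.getElem?_set_ne (by omega),
            ← List.getD_eq_getElem?_getD, K1]
          have : (k < n + 1 ∧ col s k = '1') ↔ (k < n ∧ col s k = '1') := by
            constructor <;> rintro ⟨hlt, hcol⟩ <;> exact ⟨by omega, hcol⟩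
          rw [if_congr this rfl rfl]
      · obtain ⟨_, K2⟩ := H k
        rw [K2]
        have : (k < n + 1 ∧ col s k = '0') ↔ (k < n ∧ col s k = '0') := by
          constructor <;> rintro ⟨hlt, hcol⟩
          · refine ⟨?_, hcol⟩
            rcases Nat.lt_succ_iff_lt_or_eq.mp hlt with h | h
            · exact h
            · subst h; rw [hcol] at hc1; exact absurd hc1 (by decide)
          · exact ⟨by omega, hcol⟩
        rw [if_congr this rfl rfl]
    · refine ⟨L1, by simpa using L2, fun k => ⟨?_, ?_⟩⟩
      · obtain ⟨K1, _⟩ := H k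
        rw [K1]
        have : (k < n + 1 ∧ col s k = '1') ↔ (k < n ∧ col s k = '1') := by
          constructor <;> rintro ⟨hlt, hcol⟩
          · refine ⟨?_, hcol⟩
            rcases Nat.lt_succ_iff_lt_or_eq.mp hlt with h | h
            · exact h
            · subst h; rw [hcol] at hc0; exact absurd hc0 (by decide)
          · exact ⟨by omega, hcol⟩
        rw [if_congr this rfl rfl]
      · obtain ⟨_, K2⟩ := H k
        by_cases hk : k = n
        · subst hk
          rw [List.getD_eq_getElem?_getD, List.getElem?_set_self (by omega)]
          simp only [Option.getD_some]
          rw [K2] at *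
          simp [hc0]
        · rw [List.getD_eq_getElem?_getD, List.getElem?_set_ne (by omega),
            ← List.getD_eq_getElem?_getD, K2]
          have : (k < n + 1 ∧ col s k = '0') ↔ (k < n ∧ col s k = '0') := by
            constructor <;> rintro ⟨hlt, hcol⟩ <;> exact ⟨by omega, hcol⟩
          rw [if_congr this rfl rfl]
    · refine ⟨L1, L2, fun k => ⟨?_, ?_⟩⟩
      · obtain ⟨K1, _⟩ := H k
        rw [K1]
        have : (k < n + 1 ∧ col s k = '1') ↔ (k < n ∧ col s k = '1') := by
          constructor <;> rintro ⟨hlt, hcol⟩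
          · refine ⟨?_, hcol⟩
            rcases Nat.lt_succ_iff_lt_or_eq.mp hlt with h | h
            · exact h
            · subst h; rw [hcol] at hc1; exact absurd rfl hc1
          · exact ⟨by omega, hcol⟩
        rw [if_congr this rfl rfl]
      · obtain ⟨_, K2⟩ := H k
        rw [K2]
        have : (k < n + 1 ∧ col s k = '0') ↔ (k < n ∧ col s k = '0') := by
          constructor <;> rintro ⟨hlt, hcol⟩
          · refine ⟨?_, hcol⟩
            rcases Nat.lt_succ_iff_lt_or_eq.mp hlt with h | h
            · exact h
            · subst h; rw [hcol] at hc0; exact absurd rfl hc0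
          · exact ⟨by omega, hcol⟩
        rw [if_congr this rfl rfl]

lemma outer_tally (rows : List String) (n : Nat) (oz : List Int × List Int)
    (h1 : oz.1.length = n) (h2 : oz.2.length = n) :
    (rows.foldl (fun oz s => (PySem.List.pyRange 0 (n : Int) 1).foldl (rowStep s) oz) oz).1.length = n ∧
    (rows.foldl (fun oz s => (PySem.List.pyRange 0 (n : Int) 1).foldl (rowStep s) oz) oz).2.length = n ∧
    ∀ k : Nat, k < n →
      (rows.foldl (fun oz s => (PySem.List.pyRange 0 (n : Int) 1).foldl (rowStep s) oz) oz).1.getD k 0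
        = oz.1.getD k 0 + ((rows.map (fun s => col s k)).count '1' : Int) ∧
      (rows.foldl (fun oz s => (PySem.List.pyRange 0 (n : Int) 1).foldl (rowStep s) oz) oz).2.getD k 0
        = oz.2.getD k 0 + ((rows.map (fun s => col s k)).count '0' : Int) := by
  induction rows generalizing oz with
  | nil => simp [h1, h2]
  | cons s rows ih =>
    obtain ⟨L1, L2, H⟩ := inner_tally s n oz (by omega) (by omega)
    set r := (PySem.List.pyRange 0 (n : Int) 1).foldl (rowStep s) oz with hr
    obtain ⟨M1, M2, G⟩ := ih r (by omega) (by omega)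
    simp only [List.foldl_cons, ← hr]
    refine ⟨by omega, by omega, fun k hk => ?_⟩
    obtain ⟨K1, K2⟩ := H k
    obtain ⟨G1, G2⟩ := G k hk
    constructor
    · rw [G1, K1]
      by_cases hcol : col s k = '1'
      · simp [hcol, hk]
        ring
      · simp [hcol, hk]
    · rw [G2, K2]
      by_cases hcol : col s k = '0'
      · simp [hcol, hk]
        ring
      · simp [hcol, hk]

lemma main_eq (data : List String) : get_gamma_rate data = get_gamma_rate_alt data := by
  simp only [get_gamma_rate, get_gamma_rate_alt]
  set s0 := PySem.List.pyGetD data 0 "" with hs0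
  have hm : PySem.Str.len s0 = ((s0.toList.length : Nat) : Int) := by simp
  rw [hm]
  set M := s0.toList.length with hM
  rw [show ((M : Int)).toNat = M from by simp]
  obtain ⟨T1, T2, T⟩ := outer_tally data M (List.replicate M 0, List.replicate M 0)
    (by simp) (by simp)
  congr 1
  apply PySem.List.foldl_congr_mem
  intro acc i hi
  obtain ⟨hi0, hiM⟩ := (PySem.List.mem_pyRange_one).mp hi
  obtain ⟨k, rfl⟩ : ∃ k : Nat, i = (k : Int) := ⟨i.toNat, (Int.toNat_of_nonneg hi0).symm⟩
  have hk : k < M := by exact_mod_cast hiM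
  obtain ⟨T1k, T2k⟩ := T k hk
  have hmap : (data.map fun s => (PySem.Str.pyGet? s (k : Int)).getD ' ')
      = data.map (fun s => col s k) := by
    simp [col]
  have hA : PySem.List.count (data.map fun s => (PySem.Str.pyGet? s (k : Int)).getD ' ') '1'
      = (data.map (fun s => col s k)).count '1' := by
    rw [hmap, PySem.List.count_eq]
  have hA0 : PySem.List.count (data.map fun s => (PySem.Str.pyGet? s (k : Int)).getD ' ') '0'
      = (data.map (fun s => col s k)).count '0' := by
    rw [hmap, PySem.List.count_eq]
  have hB1 : PySem.List.pyGetD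
      (data.foldl (fun oz s => (PySem.List.pyRange 0 (M : Int) 1).foldl (rowStep s) oz)
        (List.replicate M 0, List.replicate M 0)).1 (k : Int) 0
      = ((data.map (fun s => col s k)).count '1' : Int) := by
    rw [PySem.List.pyGetD_natCast, T1k]
    simp
  have hB0 : PySem.List.pyGetD
      (data.foldl (fun oz s => (PySem.List.pyRange 0 (M : Int) 1).foldl (rowStep s) oz)
        (List.replicate M 0, List.replicate M 0)).2 (k : Int) 0
      = ((data.map (fun s => col s k)).count '0' : Int) := by
    rw [PySem.List.pyGetD_natCast, T2k]
    simp
  rw [hB1, hB0]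
  refine if_congr ?_ rfl rfl
  rw [hA, hA0]
  constructor
  · intro h; exact_mod_cast h
  · intro h; exact_mod_cast h

-- ===== VERDICT (by name: the statement is the Claim_ definition above) =====
theorem get_gamma_rate_spec : Claim_equal_get_gamma_rate := by
  intro data _ _
  unfold Spec_get_gamma_rate
  exact main_eq data
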